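/- GENERATED by mk_final_copies.py from the proof of the farm's unit `decode_residue.7a` (farm:decode_residue.7a.1: Proof.lean) as the
   re-elaboration sweep compiled it — do not edit. -/
import Vorbis.Spec.Units.decode_residue_7a
import Vorbis.Spec.Worked.decode_residue_7a_Lemmas

open X86 X86.User Asan Vorbis Vorbis.Spec Vorbis.Spec.DecodeResidue

/-- Unit `decode_residue.7a`: the class book's address, the test of `f->valid_bits` and the `prep_huffman` arm of DECODE expansion #2
(0x10f314 … 0x10f36f), as the walk `seg_a` of Lemmas.lean (the worker of decode_residue.7, attempt 1). -/
theorem Vorbis.Spec.Worked.decode_residue_7a_ok : Vorbis.Spec.decode_residue_7a.Statement := by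
  intro Lay hLay μ hμ u₀ hcode h_load8 h_load1 h_load4 h_prep
  intro g hent cs pcount v hat
  exact Vorbis.Spec.decode_residue_7a.seg_a Lay hLay μ hμ u₀ hcode h_load8 h_load1 h_load4 h_prep g hent cs pcount v hat
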